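-- pv_equiv track=rewrite | github.com/kevsman/pokerplayer | poker_tactics.py | assess_board_danger
-- ===== SOURCE A (Python) =====
-- def assess_board_danger(community_cards):
--     """
--     Evaluate how coordinated the board is.
--     Returns a dictionary with boolean flags for flush and straight draws.
--     """
--     suits = [c[1] for c in community_cards]
--     ranks = sorted([int(c[0].replace('T', '10').replace('J', '11').replace('Q', '12').replace('K', '13').replace('A', '14')) for c in community_cards])
--
--     flush_draw = any(suits.count(s) >= 3 for s in set(suits))
--
--     straight_draw = False
--     if len(ranks) >= 3:
--         unique_ranks = sorted(list(set(ranks)))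
--         for i in range(len(unique_ranks) - 2):
--             if unique_ranks[i+2] - unique_ranks[i] <= 4:
--                 straight_draw = True
--                 break
--
--     return {'flush_draw': flush_draw, 'straight_draw': straight_draw}
-- ===== SOURCE B (Python) =====
-- def assess_board_danger(community_cards):
--     # Single pass: count suits in a dict and collect the set of present rank
--     # values; then decide the straight flag by scanning fixed 5-value windows
--     # over the rank axis instead of a sorted-unique sliding-triple scan.
--     counts = {}
--     present = set()
--     for c in community_cards:
--         suit = c[1]
--         counts[suit] = counts.get(suit, 0) + 1
--         r = c[0]
--         if r == 'T':
--             v = 10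
--         elif r == 'J':
--             v = 11
--         elif r == 'Q':
--             v = 12
--         elif r == 'K':
--             v = 13
--         elif r == 'A':
--             v = 14
--         else:
--             v = int(r)
--         present.add(v)
--     flush_draw = any(n >= 3 for n in counts.values())
--     straight_draw = False
--     for start in range(0, 15):
--         if sum(1 for v in present if start <= v <= start + 4) >= 3:
--             straight_draw = True
--             break
--     return {'flush_draw': flush_draw, 'straight_draw': straight_draw}
-- ===== Notes on version B (the rewrite author's own statement) =====
-- stated objective: alternative
-- what changed: B makes one pass building a suit-count dict and a set of present rank values (parsed by an explicit if/elif chain instead of string replace chains plus int()), then decides the straight flag by scanning fixed 5-value windows over the rank axis instead of A's sort + dedup + sliding-triple scan over sorted unique ranks.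
import Mathlib
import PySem

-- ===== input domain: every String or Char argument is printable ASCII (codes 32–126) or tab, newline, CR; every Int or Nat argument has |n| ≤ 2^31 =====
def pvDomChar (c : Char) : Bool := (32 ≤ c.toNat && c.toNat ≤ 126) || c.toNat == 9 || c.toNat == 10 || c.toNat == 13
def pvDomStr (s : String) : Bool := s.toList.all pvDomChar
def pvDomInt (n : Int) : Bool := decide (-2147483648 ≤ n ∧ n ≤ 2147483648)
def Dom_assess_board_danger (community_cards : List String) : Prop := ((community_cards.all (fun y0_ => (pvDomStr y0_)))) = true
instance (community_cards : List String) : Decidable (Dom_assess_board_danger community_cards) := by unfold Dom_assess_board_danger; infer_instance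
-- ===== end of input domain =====

-- B replaces A's sorted-unique sliding-triple scan and repeated suits.count scans by one
-- pass building a suit-count dict and a rank set, then a fixed 5-value-window scan (objective: alternative).

-- ===== PORT A =====
-- int(c[0].replace('T','10').replace('J','11').replace('Q','12').replace('K','13').replace('A','14'))
def pvRankCharA (r : Char) : Int :=
  (PySem.Int.ofStr? (PySem.Str.replace (PySem.Str.replace (PySem.Str.replace (PySem.Str.replace
    (PySem.Str.replace (String.ofList [r]) "T" "10") "J" "11") "Q" "12") "K" "13") "A" "14")).getD 0

def assess_board_danger (community_cards : List String) : List (String × Bool) :=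
  let suits : List Char := community_cards.map (fun c => (PySem.Str.pyGet? c 1).getD ' ')
  let ranks : List Int :=
    PySem.List.sorted (community_cards.map (fun c => pvRankCharA ((PySem.Str.pyGet? c 0).getD ' '))) (fun x => x) false
  let flush_draw := (PySem.Set.ofList suits).any (fun s => decide (3 ≤ PySem.List.count suits s))
  let straight_draw :=
    if 3 ≤ ranks.length then
      let unique_ranks := PySem.List.sorted (PySem.Set.ofList ranks) (fun x => x) false
      (PySem.List.pyRange 0 (PySem.List.len unique_ranks - 2) 1).foldl
        (fun acc i =>
          if acc then acc
          else if PySem.List.pyGetD unique_ranks (i + 2) 0 - PySem.List.pyGetD unique_ranks i 0 ≤ 4 then true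
          else acc) false
    else false
  [("flush_draw", flush_draw), ("straight_draw", straight_draw)]

-- ===== PORT B =====
-- the if/elif rank chain of Source B
def pvRankCharB (r : Char) : Int :=
  if r = 'T' then 10
  else if r = 'J' then 11
  else if r = 'Q' then 12
  else if r = 'K' then 13
  else if r = 'A' then 14
  else (PySem.Int.ofStr? (String.ofList [r])).getD 0

def assess_board_danger_alt (community_cards : List String) : List (String × Bool) :=
  let st := community_cards.foldl
    (fun (acc : PySem.Dict Char Int × PySem.Set Int) c =>
      (acc.1.insert ((PySem.Str.pyGet? c 1).getD ' ') (acc.1.getD ((PySem.Str.pyGet? c 1).getD ' ') 0 + 1),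
       PySem.Set.add acc.2 (pvRankCharB ((PySem.Str.pyGet? c 0).getD ' '))))
    (PySem.Dict.empty, PySem.Set.empty)
  let flush_draw := st.1.values.any (fun n => decide ((3 : Int) ≤ n))
  let straight_draw := (PySem.List.pyRange 0 15 1).foldl
    (fun acc start =>
      if acc then acc
      else if (3 : Int) ≤ (st.2.map (fun v => if start ≤ v ∧ v ≤ start + 4 then (1 : Int) else 0)).sum then true
      else acc) false
  [("flush_draw", flush_draw), ("straight_draw", straight_draw)]

-- ===== PRECONDITION & SPEC =====
-- Pre_: every card has at least two characters and a valid rank character; on other cards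
-- Python A raises (IndexError on c[0]/c[1], or ValueError from int()).
def Pre_assess_board_danger (community_cards : List String) : Prop :=
  ∀ c ∈ community_cards, 2 ≤ c.toList.length ∧
    c.toList.headD ' ' ∈ ['0','1','2','3','4','5','6','7','8','9','T','J','Q','K','A']
instance (community_cards : List String) : Decidable (Pre_assess_board_danger community_cards) := by
  unfold Pre_assess_board_danger; infer_instance

def pvWitness_assess_board_danger : List String := ["Ah", "Kd", "Qs", "7d"]

def Spec_assess_board_danger (community_cards : List String) (out : List (String × Bool)) : Prop := out = assess_board_danger_alt community_cards
instance (community_cards : List String) (out : List (String × Bool)) : Decidable (Spec_assess_board_danger community_cards out) := by unfold Spec_assess_board_danger; infer_instance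

-- ===== CLAIM (what is proved, stated in full; the proofs are below) =====
def Claim_equal_assess_board_danger : Prop := ∀ (community_cards : List String), Dom_assess_board_danger community_cards → Pre_assess_board_danger community_cards → Spec_assess_board_danger community_cards (assess_board_danger community_cards)

-- ===== LEMMAS AND PROOFS =====

-- the loop 'for x in l: if p(x): flag = True; break' written as a fold is an any
theorem pvFoldFlag {α : Type} (l : List α) (p : α → Prop) [DecidablePred p] (b : Bool) :
    l.foldl (fun acc x => if acc then acc else if p x then true else acc) b
      = (b || l.any fun x => decide (p x)) := by
  rw [PySem.List.foldl_congr_mem l _ (fun acc x => if decide (p x) then true else acc) b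
    (by intro acc x _; cases acc <;> by_cases hp : p x <;> simp [hp])]
  exact PySem.List.foldl_if_true_eq _ l b

-- on the allowed rank characters the two rank parsers agree and land in [0, 14]
theorem pvRankChar_agree (r : Char)
    (h : r ∈ ['0','1','2','3','4','5','6','7','8','9','T','J','Q','K','A']) :
    pvRankCharA r = pvRankCharB r ∧ 0 ≤ pvRankCharB r ∧ pvRankCharB r ≤ 14 := by
  fin_cases h <;> decide

-- three pairwise distinct members that all satisfy p force countP ≥ 3
theorem pvCountP3 {l : List Int} {p : Int → Bool} {x y z : Int}
    (hx : x ∈ l) (hy : y ∈ l) (hz : z ∈ l)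
    (hxy : x ≠ y) (hxz : x ≠ z) (hyz : y ≠ z)
    (hpx : p x = true) (hpy : p y = true) (hpz : p z = true) :
    3 ≤ l.countP p := by
  have hsub : [x, y, z] ⊆ l.filter p := by
    intro a ha
    simp only [List.mem_cons, List.not_mem_nil, or_false] at ha
    rcases ha with rfl | rfl | rfl <;> simp [List.mem_filter, *]
  have hnd : ([x, y, z] : List Int).Nodup := by simp [hxy, hxz, hyz]
  have := (hnd.subperm hsub).length_le
  simp only [List.countP_eq_length_filter]
  simpa using this

-- three pairwise distinct members force length ≥ 3
theorem pvLen3 {l : List Int} {x y z : Int}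
    (hx : x ∈ l) (hy : y ∈ l) (hz : z ∈ l)
    (hxy : x ≠ y) (hxz : x ≠ z) (hyz : y ≠ z) :
    3 ≤ l.length := by
  have hsub : [x, y, z] ⊆ l := by
    intro a ha
    simp only [List.mem_cons, List.not_mem_nil, or_false] at ha
    rcases ha with rfl | rfl | rfl <;> assumption
  have hnd : ([x, y, z] : List Int).Nodup := by simp [hxy, hxz, hyz]
  simpa using (hnd.subperm hsub).length_le

-- three distinct integers can be put in increasing order
theorem pvOrder3 (a b c : Int) (hab : a ≠ b) (hac : a ≠ c) (hbc : b ≠ c) :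
    ∃ x y z : Int, x < y ∧ y < z ∧ x ∈ [a,b,c] ∧ y ∈ [a,b,c] ∧ z ∈ [a,b,c] := by
  rcases lt_trichotomy a b with h1 | h1 | h1
  · rcases lt_trichotomy b c with h2 | h2 | h2
    · exact ⟨a, b, c, h1, h2, by simp, by simp, by simp⟩
    · exact absurd h2 hbc
    · rcases lt_trichotomy a c with h3 | h3 | h3
      · exact ⟨a, c, b, h3, h2, by simp, by simp, by simp⟩
      · exact absurd h3 hac
      · exact ⟨c, a, b, h3, h1, by simp, by simp, by simp⟩
  · exact absurd h1 hab
  · rcases lt_trichotomy a c with h2 | h2 | h2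
    · exact ⟨b, a, c, h1, h2, by simp, by simp, by simp⟩
    · exact absurd h2 hac
    · rcases lt_trichotomy b c with h3 | h3 | h3
      · exact ⟨b, c, a, h3, h2, by simp, by simp, by simp⟩
      · exact absurd h3 hbc
      · exact ⟨c, b, a, h3, h1, by simp, by simp, by simp⟩

-- ===== VERDICT (by name: the statement is the Claim_ definition above) =====
theorem assess_board_danger_spec : Claim_equal_assess_board_danger := by
  intro cards _ hpre
  unfold Spec_assess_board_danger
  -- per-card facts from the precondition
  have hchar : ∀ c ∈ cards,
      pvRankCharA ((PySem.Str.pyGet? c 0).getD ' ') = pvRankCharB ((PySem.Str.pyGet? c 0).getD ' ')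
      ∧ 0 ≤ pvRankCharB ((PySem.Str.pyGet? c 0).getD ' ')
      ∧ pvRankCharB ((PySem.Str.pyGet? c 0).getD ' ') ≤ 14 := by
    intro c hc
    obtain ⟨hlen, hhd⟩ := hpre c hc
    obtain ⟨r, rest, hr⟩ : ∃ r rest, c.toList = r :: rest := by
      cases h : c.toList with
      | nil => rw [h] at hlen; simp at hlen
      | cons a t => exact ⟨a, t, rfl⟩
    have hx : (PySem.Str.pyGet? c 0).getD ' ' = r := by simp [pysem, hr]
    rw [hr] at hhd
    simp only [List.headD_cons] at hhd
    rw [hx]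
    exact pvRankChar_agree r hhd
  -- unfold both ports and normalise B's paired loop into its two accumulators
  simp only [assess_board_danger, assess_board_danger_alt]
  rw [PySem.List.foldl_prod_mk
    (f := fun (d : PySem.Dict Char Int) (c : String) =>
      d.insert ((PySem.Str.pyGet? c 1).getD ' ') (d.getD ((PySem.Str.pyGet? c 1).getD ' ') 0 + 1))
    (g := fun (s : PySem.Set Int) (c : String) =>
      PySem.Set.add s (pvRankCharB ((PySem.Str.pyGet? c 0).getD ' ')))]
  rw [List.map_congr_left (l := cards) (fun c hc => (hchar c hc).1)]
  rw [show cards.foldl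
      (fun (d : PySem.Dict Char Int) (c : String) =>
        d.insert ((PySem.Str.pyGet? c 1).getD ' ') (d.getD ((PySem.Str.pyGet? c 1).getD ' ') 0 + 1))
      PySem.Dict.empty
      = PySem.Dict.counter (cards.map (fun c => (PySem.Str.pyGet? c 1).getD ' ')) by
    rw [← PySem.Dict.foldl_insert_getD_add_one_eq_counter, List.foldl_map]]
  rw [show cards.foldl
      (fun (s : PySem.Set Int) (c : String) =>
        PySem.Set.add s (pvRankCharB ((PySem.Str.pyGet? c 0).getD ' ')))
      PySem.Set.empty
      = PySem.Set.ofList (cards.map (fun c => pvRankCharB ((PySem.Str.pyGet? c 0).getD ' '))) by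
    rw [PySem.Set.ofList_eq_foldl, List.foldl_map]
    rfl]
  set suits : List Char := cards.map (fun c => (PySem.Str.pyGet? c 1).getD ' ') with hsuits
  set R : List Int := cards.map (fun c => pvRankCharB ((PySem.Str.pyGet? c 0).getD ' ')) with hR
  have hRb : ∀ v ∈ R, 0 ≤ v ∧ v ≤ 14 := by
    intro v hv
    rw [hR] at hv
    obtain ⟨c, hc, rfl⟩ := List.mem_map.mp hv
    exact ⟨(hchar c hc).2.1, (hchar c hc).2.2⟩
  set P : Prop := ∃ x, x ∈ R ∧ ∃ y, y ∈ R ∧ ∃ z, z ∈ R ∧ x < y ∧ y < z ∧ z - x ≤ 4 with hP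
  set ranks : List Int := PySem.List.sorted R (fun x => x) false with hranks
  set u : List Int := PySem.List.sorted (PySem.Set.ofList ranks) (fun x => x) false with hu
  have hu_pair : u.Pairwise (· < ·) := PySem.List.sorted_ofList_pairwise_lt ranks
  have hu_mono := List.pairwise_iff_getElem.mp hu_pair
  have hu_mem : ∀ v, v ∈ u ↔ v ∈ R := by
    intro v
    rw [hu, PySem.List.mem_sorted, PySem.Set.mem_ofList, hranks, PySem.List.mem_sorted]
  have hranks_len : ranks.length = R.length := by rw [hranks, PySem.List.length_sorted]
  -- A's straight flag captures P
  have hAiff :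
      (if 3 ≤ ranks.length then
        (PySem.List.pyRange 0 (PySem.List.len u - 2) 1).foldl
          (fun acc i =>
            if acc then acc
            else if PySem.List.pyGetD u (i + 2) 0 - PySem.List.pyGetD u i 0 ≤ 4 then true
            else acc) false
      else false) = true ↔ P := by
    constructor
    · intro h
      by_cases hg : 3 ≤ ranks.length
      · rw [if_pos hg, pvFoldFlag, Bool.false_or] at h
        obtain ⟨i, hi, hq⟩ := List.any_eq_true.mp h
        rw [PySem.List.mem_pyRange_one] at hi
        rw [PySem.List.len_eq] at hi
        have h0 : (0:Int) ≤ i := hi.1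
        have h2 : i.toNat + 2 < u.length := by omega
        rw [PySem.List.pyGetD_eq_getElem u (i := i + 2) 0 (by omega) (by omega),
            PySem.List.pyGetD_eq_getElem u (i := i) 0 (by omega) (by omega),
            decide_eq_true_eq] at hq
        have hti : (i + 2).toNat = i.toNat + 2 := by omega
        rw [getElem_congr_idx hti] at hq
        refine ⟨u[i.toNat], (hu_mem _).mp (List.getElem_mem _),
                u[i.toNat + 1], (hu_mem _).mp (List.getElem_mem _),
                u[i.toNat + 2], (hu_mem _).mp (List.getElem_mem _),
                hu_mono _ _ (by omega) (by omega) (by omega),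
                hu_mono _ _ (by omega) (by omega) (by omega), hq⟩
      · rw [if_neg hg] at h; exact absurd h (by simp)
    · rintro ⟨x, hxR, y, hyR, z, hzR, hxy, hyz, hzx⟩
      have hg : 3 ≤ ranks.length := by
        rw [hranks_len]
        exact pvLen3 hxR hyR hzR (by omega) (by omega) (by omega)
      rw [if_pos hg, pvFoldFlag, Bool.false_or]
      obtain ⟨jx, hjx, hjxe⟩ := List.mem_iff_getElem.mp ((hu_mem x).mpr hxR)
      obtain ⟨jy, hjy, hjye⟩ := List.mem_iff_getElem.mp ((hu_mem y).mpr hyR)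
      obtain ⟨jz, hjz, hjze⟩ := List.mem_iff_getElem.mp ((hu_mem z).mpr hzR)
      have hxyj : jx < jy := by
        rcases Nat.lt_trichotomy jx jy with h | h | h
        · exact h
        · exfalso
          have : x = y := by rw [← hjxe, ← hjye]; exact getElem_congr_idx h
          omega
        · exfalso; have := hu_mono _ _ hjy hjx h; rw [hjxe, hjye] at this; omega
      have hyzj : jy < jz := by
        rcases Nat.lt_trichotomy jy jz with h | h | h
        · exact h
        · exfalso
          have : y = z := by rw [← hjye, ← hjze]; exact getElem_congr_idx h
          omega
        · exfalso; have := hu_mono _ _ hjz hjy h; rw [hjye, hjze] at this; omega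
      apply List.any_eq_true.mpr
      refine ⟨(jx : Int), ?_, ?_⟩
      · rw [PySem.List.mem_pyRange_one, PySem.List.len_eq]; omega
      · rw [PySem.List.pyGetD_eq_getElem u (i := (jx : Int) + 2) 0 (by omega) (by omega),
            PySem.List.pyGetD_eq_getElem u (i := (jx : Int)) 0 (by omega) (by omega),
            decide_eq_true_eq]
        have ht2 : ((jx : Int) + 2).toNat = jx + 2 := by omega
        have ht0 : ((jx : Int)).toNat = jx := by omega
        rw [getElem_congr_idx ht2, getElem_congr_idx ht0]
        have hle : u[jx + 2] ≤ u[jz] := by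
          rcases Nat.lt_or_ge (jx + 2) jz with h | h
          · exact le_of_lt (hu_mono _ _ (by omega) hjz h)
          · have h22 : jx + 2 = jz := by omega
            exact le_of_eq (getElem_congr_idx h22)
        rw [hjxe, hjze] at *
        omega
  -- B's straight flag captures P
  have hBiff : ∀ (present : List Int), present = PySem.Set.ofList R →
      (((PySem.List.pyRange 0 15 1).foldl
        (fun acc start =>
          if acc then acc
          else if (3 : Int) ≤ (present.map (fun v => if start ≤ v ∧ v ≤ start + 4 then (1 : Int) else 0)).sum then true
          else acc) false) = true ↔ P) := by
    intro present hpres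
    have hpr_mem : ∀ v, v ∈ present ↔ v ∈ R := by
      intro v; rw [hpres, PySem.Set.mem_ofList]
    have hpr_nd : present.Nodup := hpres ▸ PySem.Set.nodup_ofList R
    have hsum : ∀ s : Int,
        (present.map (fun v => if s ≤ v ∧ v ≤ s + 4 then (1 : Int) else 0)).sum
          = ((present.countP (fun v => decide (s ≤ v ∧ v ≤ s + 4)) : Int)) := by
      intro s
      rw [List.map_congr_left (g := fun v => if decide (s ≤ v ∧ v ≤ s + 4) = true then (1:Int) else 0)
        (by intro v _; simp)]
      exact PySem.List.sum_map_ite_one_zero _ present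
    rw [pvFoldFlag, Bool.false_or]
    constructor
    · intro h
      obtain ⟨s, hs, hq⟩ := List.any_eq_true.mp h
      rw [decide_eq_true_eq, hsum] at hq
      have hcnt : 3 ≤ present.countP (fun v => decide (s ≤ v ∧ v ≤ s + 4)) := by exact_mod_cast hq
      set w : List Int := present.filter (fun v => decide (s ≤ v ∧ v ≤ s + 4)) with hw
      have hwlen : 3 ≤ w.length := by
        rw [hw, ← List.countP_eq_length_filter]; exact hcnt
      have hw_nd : w.Nodup := hpr_nd.filter _
      have hmemw : ∀ (k : Nat) (hk : k < w.length), w[k] ∈ present ∧ s ≤ w[k] ∧ w[k] ≤ s + 4 := by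
        intro k hk
        have hmem : w[k] ∈ w := List.getElem_mem _
        have := List.mem_filter.mp hmem
        refine ⟨this.1, ?_⟩
        have := this.2
        rw [decide_eq_true_eq] at this
        exact this
      have h0 : (0:Nat) < w.length := by omega
      have h1 : (1:Nat) < w.length := by omega
      have h2 : (2:Nat) < w.length := by omega
      have hne01 : w[0] ≠ w[1] := by rw [ne_eq, hw_nd.getElem_inj_iff]; omega
      have hne02 : w[0] ≠ w[2] := by rw [ne_eq, hw_nd.getElem_inj_iff]; omega
      have hne12 : w[1] ≠ w[2] := by rw [ne_eq, hw_nd.getElem_inj_iff]; omega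
      obtain ⟨x, y, z, hxy, hyz, hxm, hym, hzm⟩ := pvOrder3 _ _ _ hne01 hne02 hne12
      have hfacts : ∀ a ∈ [w[0], w[1], w[2]], a ∈ present ∧ s ≤ a ∧ a ≤ s + 4 := by
        intro a ha
        simp only [List.mem_cons, List.not_mem_nil, or_false] at ha
        rcases ha with rfl | rfl | rfl
        · exact hmemw 0 h0
        · exact hmemw 1 h1
        · exact hmemw 2 h2
      obtain ⟨hxp, hxl, hxh⟩ := hfacts x hxm
      obtain ⟨hyp, -, -⟩ := hfacts y hym
      obtain ⟨hzp, hzl, hzh⟩ := hfacts z hzm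
      exact ⟨x, (hpr_mem x).mp hxp, y, (hpr_mem y).mp hyp, z, (hpr_mem z).mp hzp,
             hxy, hyz, by omega⟩
    · rintro ⟨x, hxR, y, hyR, z, hzR, hxy, hyz, hzx⟩
      apply List.any_eq_true.mpr
      refine ⟨x, ?_, ?_⟩
      · rw [PySem.List.mem_pyRange_one]
        have hx := hRb x hxR
        have hz := hRb z hzR
        omega
      · rw [decide_eq_true_eq, hsum]
        have : 3 ≤ present.countP (fun v => decide (x ≤ v ∧ v ≤ x + 4)) := by
          apply pvCountP3 ((hpr_mem x).mpr hxR) ((hpr_mem y).mpr hyR) ((hpr_mem z).mpr hzR)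
            (by omega) (by omega) (by omega)
          · rw [decide_eq_true_eq]; omega
          · rw [decide_eq_true_eq]; omega
          · rw [decide_eq_true_eq]; omega
        exact_mod_cast this
  -- flush components agree
  have hflush : (PySem.Set.ofList suits).any (fun s => decide (3 ≤ PySem.List.count suits s))
      = (PySem.Dict.counter suits).values.any (fun n => decide ((3 : Int) ≤ n)) := by
    rw [show (PySem.Dict.counter suits).values = (PySem.Dict.counter suits).items.map Prod.snd from rfl]
    rw [PySem.Dict.items_counter, List.map_map, List.any_map]
    apply PySem.List.any_congr_mem
    intro k _
    simp only [Function.comp]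
    rw [decide_eq_decide]
    rw [PySem.List.count_eq]
    omega
  have hstraight := hAiff.trans ((hBiff (PySem.Set.ofList R) rfl)).symm
  rw [hflush, Bool.eq_iff_iff.mpr hstraight]
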